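-- pv_equiv track=rewrite | github.com/Shubhamsgupta24/Computer-Networks-and-Security-CNS | DoubleTranspositionCipher.py | encrypt_double_transposition
-- ===== SOURCE A (Python) =====
-- def create_matrix(text, rows, cols):
--     matrix = [['' for _ in range(cols)] for _ in range(rows)]
--     idx = 0
--     for r in range(rows):
--         for c in range(cols):
--             if idx < len(text):
--                 matrix[r][c] = text[idx]
--                 idx += 1
--     return matrix
--
-- def pad_plaintext(plaintext, rows, cols):
--     padded_length = rows * cols
--     if len(plaintext) < padded_length:
--         plaintext += 'X' * (padded_length - len(plaintext))
--     return plaintext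
--
-- def encrypt_double_transposition(plaintext, row_perm, col_perm):
--     rows = len(row_perm)
--     cols = len(col_perm)
--
--     plaintext = pad_plaintext(plaintext, rows, cols)
--
--     matrix = create_matrix(plaintext, rows, cols)
--
--     transposed_matrix = [matrix[row_perm[i]] for i in range(rows)]
--
--     encrypted_text = ''
--     for r in range(rows):
--         for c in range(cols):
--             encrypted_text += transposed_matrix[r][col_perm[c]]
--
--     return encrypted_text
-- ===== SOURCE B (Python) =====
-- def encrypt_double_transposition(plaintext, row_perm, col_perm):
--     rows = len(row_perm)
--     cols = len(col_perm)
--     padded = plaintext + 'X' * (rows * cols - len(plaintext))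
--     # stage 1: column-permute each row slice of the padded text
--     mixed_rows = []
--     for r in range(rows):
--         row = padded[r * cols:(r + 1) * cols]
--         mixed_rows.append(''.join(row[k] for k in col_perm))
--     # stage 2: concatenate the column-mixed rows in row_perm order
--     return ''.join(mixed_rows[i] for i in row_perm)
-- ===== Notes on version B (the rewrite author's own statement) =====
-- stated objective: alternative
-- what changed: B stages the cipher in the opposite order and by a different mechanism: it first column-permutes each row SLICE of the padded text (padded[r*cols:(r+1)*cols]) into a list of mixed rows, then concatenates those rows in row_perm order by iterating over the permutation lists themselves; A builds a 2D matrix, materialises a permuted row list, and reads cells off in a nested range loop. Correct because the row and column permutations act on independent coordinates and commute.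
import Mathlib
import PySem

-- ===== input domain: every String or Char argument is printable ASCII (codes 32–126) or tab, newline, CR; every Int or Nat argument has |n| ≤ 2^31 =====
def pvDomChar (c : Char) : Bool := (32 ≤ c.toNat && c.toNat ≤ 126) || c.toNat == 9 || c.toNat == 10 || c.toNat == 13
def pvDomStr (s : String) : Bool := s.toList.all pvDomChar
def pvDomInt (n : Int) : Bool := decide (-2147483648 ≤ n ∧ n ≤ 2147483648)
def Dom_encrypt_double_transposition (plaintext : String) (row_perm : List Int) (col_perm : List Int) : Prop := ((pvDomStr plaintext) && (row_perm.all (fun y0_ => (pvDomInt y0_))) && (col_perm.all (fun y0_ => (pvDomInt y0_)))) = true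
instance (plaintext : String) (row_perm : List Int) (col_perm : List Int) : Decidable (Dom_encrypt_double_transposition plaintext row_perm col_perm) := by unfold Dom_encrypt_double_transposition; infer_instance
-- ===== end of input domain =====

-- B stages the cipher the other way round: it first column-permutes each row SLICE of the
-- padded text into a list of mixed rows, then concatenates those rows in row_perm order —
-- no matrix, no permuted-row list, no nested read-off loop; objective: alternative
-- (the two permutations act on independent coordinates, so the stagings agree).
-- Python strings are represented as List Char internally ('' cells = [], chars = singletons).

-- ===== PORT A =====
-- create_matrix's inner 'for c in range(cols)' loop: one row, threading idx
def pvA_fillRow (text : List Char) (cols idx : Nat) : List (List Char) × Nat :=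
  match cols with
  | 0 => ([], idx)
  | c + 1 =>
    if idx < text.length then
      let rest := pvA_fillRow text c (idx + 1)
      ([text.getD idx 'X'] :: rest.1, rest.2)
    else
      let rest := pvA_fillRow text c idx
      ([] :: rest.1, rest.2)

-- create_matrix's outer 'for r in range(rows)' loop
def pvA_fillRows (text : List Char) (rows cols idx : Nat) : List (List (List Char)) :=
  match rows with
  | 0 => []
  | r + 1 =>
    let row := pvA_fillRow text cols idx
    row.1 :: pvA_fillRows text r cols row.2

def encrypt_double_transposition (plaintext : String) (row_perm : List Int) (col_perm : List Int) : String :=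
  let rows := row_perm.length
  let cols := col_perm.length
  -- pad_plaintext
  let padded : List Char :=
    if plaintext.toList.length < rows * cols then
      plaintext.toList ++ List.replicate (rows * cols - plaintext.toList.length) 'X'
    else plaintext.toList
  -- create_matrix
  let matrix := pvA_fillRows padded rows cols 0
  -- transposed_matrix = [matrix[row_perm[i]] for i in range(rows)]
  -- (i < rows, so row_perm[i] is safe and ported as getD; matrix[row_perm[i]] may raise
  --  IndexError — pyGetD is exact under Pre_, which keeps row_perm[i] in range)
  let transposed := (List.range rows).map (fun i => PySem.List.pyGetD matrix (row_perm.getD i 0) [])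
  -- encrypted_text += transposed_matrix[r][col_perm[c]]  (col_perm[c] exact under Pre_ likewise)
  String.ofList ((List.range rows).foldl (fun acc r =>
    (List.range cols).foldl (fun acc c =>
      acc ++ PySem.List.pyGetD (transposed.getD r []) (col_perm.getD c 0) []) acc) [])

-- ===== PORT B =====
def encrypt_double_transposition_alt (plaintext : String) (row_perm : List Int) (col_perm : List Int) : String :=
  let rows := row_perm.length
  let cols := col_perm.length
  let padded := plaintext.toList ++ List.replicate (rows * cols - plaintext.toList.length) 'X'
  -- stage 1: column-permute each row slice padded[r*cols:(r+1)*cols]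
  -- (row[k] may raise IndexError — pyGetD is exact under Pre_, which keeps k in range)
  let mixed := (List.range rows).map (fun r =>
    let row := PySem.List.slice padded (some ((r * cols : Nat) : Int)) (some (((r + 1) * cols : Nat) : Int))
    col_perm.map (fun k => PySem.List.pyGetD row k 'X'))
  -- stage 2: concatenate the column-mixed rows in row_perm order (mixed_rows[i] likewise)
  String.ofList (row_perm.map (fun i => PySem.List.pyGetD mixed i [])).flatten

-- ===== PRECONDITION & SPEC =====
-- Pre_ excludes exactly the inputs on which A raises IndexError: a row_perm (col_perm) entry
-- outside the valid Python index range [-rows, rows) (resp. [-cols, cols)); with row_perm = []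
-- A's loops never index anything, so col_perm is unconstrained there.
def Pre_encrypt_double_transposition (plaintext : String) (row_perm : List Int) (col_perm : List Int) : Prop :=
  (∀ v ∈ row_perm, -(row_perm.length : Int) ≤ v ∧ v < row_perm.length) ∧
  (row_perm = [] ∨ ∀ v ∈ col_perm, -(col_perm.length : Int) ≤ v ∧ v < col_perm.length)
instance (plaintext : String) (row_perm : List Int) (col_perm : List Int) : Decidable (Pre_encrypt_double_transposition plaintext row_perm col_perm) := by unfold Pre_encrypt_double_transposition; infer_instance

def pvWitness_encrypt_double_transposition : String × List Int × List Int := ("HELLO", [1, 0], [2, -3, 1])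

def Spec_encrypt_double_transposition (plaintext : String) (row_perm : List Int) (col_perm : List Int) (out : String) : Prop := out = encrypt_double_transposition_alt plaintext row_perm col_perm
instance (plaintext : String) (row_perm : List Int) (col_perm : List Int) (out : String) : Decidable (Spec_encrypt_double_transposition plaintext row_perm col_perm out) := by unfold Spec_encrypt_double_transposition; infer_instance

-- ===== CLAIM (what is proved, stated in full; the proofs are below) =====
def Claim_equal_encrypt_double_transposition : Prop := ∀ (plaintext : String) (row_perm : List Int) (col_perm : List Int), Dom_encrypt_double_transposition plaintext row_perm col_perm → Pre_encrypt_double_transposition plaintext row_perm col_perm → Spec_encrypt_double_transposition plaintext row_perm col_perm (encrypt_double_transposition plaintext row_perm col_perm)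

-- ===== LEMMAS AND PROOFS =====

-- the common normal form: cell (r, c) of the output is L[(row_perm[r] mod rows)*cols + (col_perm[c] mod cols)]
def pvCanon (L : List Char) (row_perm : List Int) (col_perm : List Int) : List Char :=
  (List.range row_perm.length).flatMap (fun r =>
    (List.range col_perm.length).map (fun c =>
      L.getD ((PySem.Int.mod (row_perm.getD r 0) row_perm.length).toNat * col_perm.length
            + (PySem.Int.mod (col_perm.getD c 0) col_perm.length).toNat) 'X'))

-- one matrix row, when the text reaches past idx + cols, is the chars text[idx..idx+cols)
theorem pvA_fillRow_eq (text : List Char) (cols : Nat) :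
    ∀ idx, idx + cols ≤ text.length →
      pvA_fillRow text cols idx =
        ((List.range cols).map (fun c => [text.getD (idx + c) 'X']), idx + cols) := by
  induction cols with
  | zero => intro idx _; simp [pvA_fillRow]
  | succ c ih =>
    intro idx h
    have hidx : idx < text.length := by omega
    rw [pvA_fillRow]
    simp only [hidx, if_pos, ih (idx + 1) (by omega), List.range_succ_eq_map, List.map_cons,
      List.map_map]
    refine Prod.ext ?_ (by simp; omega)
    simp only
    refine List.cons_eq_cons.mpr ⟨by simp, ?_⟩
    apply List.map_congr_left
    intro x _
    simp [Function.comp]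
    congr 2
    omega

-- the whole matrix: cell (r, c) holds text[r*cols + c]
theorem pvA_fillRows_eq (text : List Char) (cols : Nat) (rows : Nat) :
    ∀ idx, idx + rows * cols ≤ text.length →
      pvA_fillRows text rows cols idx =
        (List.range rows).map (fun r => (List.range cols).map (fun c => [text.getD (idx + r * cols + c) 'X'])) := by
  induction rows with
  | zero => intro idx _; simp [pvA_fillRows]
  | succ r ih =>
    intro idx h
    rw [pvA_fillRows, pvA_fillRow_eq text cols idx (by nlinarith)]
    simp only [ih (idx + cols) (by nlinarith), List.range_succ_eq_map, List.map_cons, List.map_map]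
    refine List.cons_eq_cons.mpr ⟨by simp, ?_⟩
    apply List.map_congr_left
    intro x _
    simp only [Function.comp]
    apply List.map_congr_left
    intro y _
    congr 3
    rw [Nat.succ_mul]
    omega

-- Python indexing with an in-range (possibly negative) index, as a getD at (i mod len)
theorem pv_pyGetD_mod {α : Type} (xs : List α) (i : Int) (d : α)
    (h1 : -(xs.length : Int) ≤ i) (h2 : i < xs.length) :
    PySem.List.pyGetD xs i d = xs.getD (PySem.Int.mod i xs.length).toNat d := by
  have hlen : (0:Int) < xs.length := by omega
  rw [PySem.Int.mod_eq_emod_of_pos hlen]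
  by_cases hi : 0 ≤ i
  · rw [PySem.List.pyGetD_eq_getElem xs d hi h2, Int.emod_eq_of_lt hi h2,
      List.getD_eq_getElem xs d (by omega)]
  · have hk : i = -(((-i).toNat : Nat) : Int) := by omega
    have hmod : i % (xs.length:Int) = i + xs.length := by
      rw [← Int.add_emod_right]
      exact Int.emod_eq_of_lt (by omega) (by omega)
    rw [hk, PySem.List.pyGetD_neg_natCast xs ((-i).toNat) d (by omega) (by omega)]
    rw [← hk, hmod, List.getD_eq_getElem xs d (by omega)]
    congr 1
    omega

-- mapping over a list = mapping its index range through getD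
theorem pv_map_eq_range {α β : Type} [Inhabited α] (l : List α) (f : α → β) :
    l.map f = (List.range l.length).map (fun r => f (l.getD r default)) := by
  apply List.ext_getElem (by simp)
  intro n h1 h2
  have hn : n < l.length := by simpa using h1
  simp [List.getD, List.getElem?_eq_getElem hn]

-- A, under in-range permutation entries, computes the normal form over the padded text
theorem pv_A_canon (plaintext : String) (row_perm : List Int) (col_perm : List Int)
    (hr : ∀ v ∈ row_perm, -(row_perm.length : Int) ≤ v ∧ v < row_perm.length)
    (hc : ∀ v ∈ col_perm, -(col_perm.length : Int) ≤ v ∧ v < col_perm.length) :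
    encrypt_double_transposition plaintext row_perm col_perm =
    String.ofList (pvCanon (plaintext.toList ++ List.replicate (row_perm.length * col_perm.length - plaintext.toList.length) 'X') row_perm col_perm) := by
  unfold encrypt_double_transposition pvCanon
  set rows := row_perm.length with hrows
  set cols := col_perm.length with hcols
  set l := plaintext.toList with hl
  set L := l ++ List.replicate (rows * cols - l.length) 'X' with hL
  have hLlen : rows * cols ≤ L.length := by
    simp only [hL, List.length_append, List.length_replicate]; omega
  have hpad : (if l.length < rows * cols then
      l ++ List.replicate (rows * cols - l.length) 'X' else l) = L := by
    split_ifs with hlt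
    · rfl
    · simp only [hL]
      rw [Nat.sub_eq_zero_of_le (by omega)]
      simp
  simp only [hpad]
  rw [pvA_fillRows_eq L cols rows 0 (by omega)]
  set M := (List.range rows).map (fun r => (List.range cols).map (fun c => [L.getD (0 + r * cols + c) 'X'])) with hM
  have hMlen : M.length = rows := by simp [hM]
  congr 1
  rw [PySem.List.foldl_congr_mem _ _
      (fun acc r => acc ++ (List.range cols).flatMap (fun c =>
        PySem.List.pyGetD (((List.range rows).map (fun i => PySem.List.pyGetD M (row_perm.getD i 0) [])).getD r [])
          (col_perm.getD c 0) [])) _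
      (fun acc r _ => PySem.List.foldl_append_eq_flatMap _ _ _),
    PySem.List.foldl_append_eq_flatMap, List.nil_append]
  rw [List.flatMap_def, List.flatMap_def]
  apply congrArg List.flatten
  apply List.map_congr_left
  intro r hrm
  have hrlt : r < rows := List.mem_range.mp hrm
  have hrows : 0 < rows := by omega
  -- the selected row
  have hv : row_perm.getD r 0 ∈ row_perm := by
    rw [List.getD_eq_getElem row_perm 0 (by omega)]
    exact List.getElem_mem _
  obtain ⟨hv1, hv2⟩ := hr _ hv
  rw [PySem.List.getD_map_range _ rows r [] hrlt,
    pv_pyGetD_mod M _ [] (by rw [hMlen]; exact_mod_cast hv1) (by rw [hMlen]; exact_mod_cast hv2),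
    hMlen]
  set ri := (PySem.Int.mod (row_perm.getD r 0) rows).toNat with hri
  have hrilt : ri < rows := by
    have h1 := PySem.Int.mod_lt (row_perm.getD r 0) (b := (rows : Int)) (by exact_mod_cast hrows)
    have h2 := PySem.Int.mod_nonneg (row_perm.getD r 0) (b := (rows : Int)) (by exact_mod_cast hrows)
    omega
  rw [hM, PySem.List.getD_map_range _ rows ri [] hrilt]
  conv_rhs => rw [List.map_eq_flatMap]
  rw [List.flatMap_def, List.flatMap_def]
  apply congrArg List.flatten
  apply List.map_congr_left
  intro c hcm
  have hclt : c < cols := List.mem_range.mp hcm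
  have hcols : 0 < cols := by omega
  -- the selected cell
  have hw : col_perm.getD c 0 ∈ col_perm := by
    rw [List.getD_eq_getElem col_perm 0 (by omega)]
    exact List.getElem_mem _
  obtain ⟨hw1, hw2⟩ := hc _ hw
  have hlen2 : ((List.range cols).map (fun c => [L.getD (0 + ri * cols + c) 'X'])).length = cols := by simp
  rw [pv_pyGetD_mod _ _ [] (by rw [hlen2]; exact_mod_cast hw1) (by rw [hlen2]; exact_mod_cast hw2),
    hlen2]
  set ci := (PySem.Int.mod (col_perm.getD c 0) cols).toNat with hci
  have hcilt : ci < cols := by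
    have h1 := PySem.Int.mod_lt (col_perm.getD c 0) (b := (cols : Int)) (by exact_mod_cast hcols)
    have h2 := PySem.Int.mod_nonneg (col_perm.getD c 0) (b := (cols : Int)) (by exact_mod_cast hcols)
    omega
  rw [PySem.List.getD_map_range _ cols ci [] hcilt]
  simp

-- B, under in-range permutation entries, computes the same normal form
theorem pv_B_canon (plaintext : String) (row_perm : List Int) (col_perm : List Int)
    (hr : ∀ v ∈ row_perm, -(row_perm.length : Int) ≤ v ∧ v < row_perm.length)
    (hc : ∀ v ∈ col_perm, -(col_perm.length : Int) ≤ v ∧ v < col_perm.length) :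
    encrypt_double_transposition_alt plaintext row_perm col_perm =
    String.ofList (pvCanon (plaintext.toList ++ List.replicate (row_perm.length * col_perm.length - plaintext.toList.length) 'X') row_perm col_perm) := by
  unfold encrypt_double_transposition_alt pvCanon
  set rows := row_perm.length with hrows
  set cols := col_perm.length with hcols
  set L := plaintext.toList ++ List.replicate (rows * cols - plaintext.toList.length) 'X' with hL
  have hLlen : rows * cols ≤ L.length := by
    simp only [hL, List.length_append, List.length_replicate]; omega
  set mixed := (List.range rows).map (fun r =>
    col_perm.map (fun k => PySem.List.pyGetD
      (PySem.List.slice L (some ((r * cols : Nat) : Int)) (some (((r + 1) * cols : Nat) : Int))) k 'X')) with hmix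
  have hmixlen : mixed.length = rows := by simp [hmix]
  show String.ofList (row_perm.map (fun i => PySem.List.pyGetD mixed i [])).flatten = _
  congr 1
  rw [List.flatMap_def, pv_map_eq_range row_perm (fun i => PySem.List.pyGetD mixed i [])]
  apply congrArg List.flatten
  apply List.map_congr_left
  intro r hrm
  have hrlt : r < rows := List.mem_range.mp hrm
  have hrows : 0 < rows := by omega
  have hv : row_perm.getD r default ∈ row_perm := by
    rw [List.getD_eq_getElem row_perm default (by omega)]
    exact List.getElem_mem _
  obtain ⟨hv1, hv2⟩ := hr _ hv
  rw [pv_pyGetD_mod mixed _ [] (by rw [hmixlen]; exact_mod_cast hv1) (by rw [hmixlen]; exact_mod_cast hv2),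
    hmixlen]
  have hdef : (default : Int) = 0 := rfl
  rw [hdef]
  set ri := (PySem.Int.mod (row_perm.getD r 0) rows).toNat with hri
  have hrilt : ri < rows := by
    have h1 := PySem.Int.mod_lt (row_perm.getD r 0) (b := (rows : Int)) (by exact_mod_cast hrows)
    have h2 := PySem.Int.mod_nonneg (row_perm.getD r 0) (b := (rows : Int)) (by exact_mod_cast hrows)
    omega
  rw [hmix, PySem.List.getD_map_range _ rows ri _ hrilt]
  -- the slice is exactly cols characters starting at ri*cols
  have hslice : PySem.List.slice L (some ((ri * cols : Nat) : Int)) (some (((ri + 1) * cols : Nat) : Int))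
      = (L.drop (ri * cols)).take cols := by
    rw [PySem.List.slice_natCast]
    congr 1
    rw [Nat.succ_mul]
    omega
  have hslicelen : ((L.drop (ri * cols)).take cols).length = cols := by
    simp only [List.length_take, List.length_drop]
    have : (ri + 1) * cols ≤ L.length := le_trans (by nlinarith) hLlen
    rw [Nat.succ_mul] at this
    omega
  rw [hslice, pv_map_eq_range col_perm _]
  apply List.map_congr_left
  intro c hcm
  have hclt : c < cols := List.mem_range.mp hcm
  have hcols : 0 < cols := by omega
  have hw : col_perm.getD c default ∈ col_perm := by
    rw [List.getD_eq_getElem col_perm default (by omega)]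
    exact List.getElem_mem _
  obtain ⟨hw1, hw2⟩ := hc _ hw
  rw [pv_pyGetD_mod _ _ 'X' (by rw [hslicelen]; exact_mod_cast hw1) (by rw [hslicelen]; exact_mod_cast hw2),
    hslicelen, hdef]
  set ci := (PySem.Int.mod (col_perm.getD c 0) cols).toNat with hci
  have hcilt : ci < cols := by
    have h1 := PySem.Int.mod_lt (col_perm.getD c 0) (b := (cols : Int)) (by exact_mod_cast hcols)
    have h2 := PySem.Int.mod_nonneg (col_perm.getD c 0) (b := (cols : Int)) (by exact_mod_cast hcols)
    omega
  have hidx : ri * cols + ci < L.length := le_trans (by nlinarith [Nat.succ_mul ri cols]) hLlen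
  rw [List.getD_eq_getElem _ 'X' (by rw [hslicelen]; exact hcilt),
    List.getD_eq_getElem L 'X' hidx]
  simp [List.getElem_take, List.getElem_drop]

-- with no rows both ports produce the empty string, whatever col_perm holds
theorem pv_nil (plaintext : String) (col_perm : List Int) :
    encrypt_double_transposition plaintext [] col_perm =
    encrypt_double_transposition_alt plaintext [] col_perm := by
  simp [encrypt_double_transposition, encrypt_double_transposition_alt]

-- ===== VERDICT (by name: the statement is the Claim_ definition above) =====
theorem encrypt_double_transposition_spec : Claim_equal_encrypt_double_transposition := by
  intro plaintext row_perm col_perm _ hpre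
  rcases hpre.2 with hnil | hc
  · subst hnil; exact pv_nil plaintext col_perm
  · show _ = _
    rw [pv_A_canon plaintext row_perm col_perm hpre.1 hc,
      pv_B_canon plaintext row_perm col_perm hpre.1 hc]
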